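-- pv_equiv track=rewrite | github.com/wrightgs/CHARMING | CHARMING.py | generateCodonSeq
-- ===== SOURCE A (Python) =====
-- def generateCodonSeq(stringSeq):
--     """Takes in an mRNA sequence as a string and returns it as a list with
--     each element in the list being a specific codon
--     """
--     codonSeq = [] #list of codons to be returned
--     extras = ""
--     for line in stringSeq:
--         line = line.rstrip()
--         string = str(extras) + str(line)
--         i=0
--         j=3
--         while j<=len(string):
--             codonSeq.append(string[i:j])
--             i+=3
--             j+=3
--         extras = str(string[i:])
--     return codonSeq
-- ===== SOURCE B (Python) =====
-- def generateCodonSeq(stringSeq):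
--     """Same result as A: rstrip each line, concatenate everything once,
--     then chunk the whole sequence into 3-char codons in a second pass,
--     dropping any trailing remainder (no stateful carry between lines)."""
--     s = "".join(line.rstrip() for line in stringSeq)
--     return [s[3 * k:3 * k + 3] for k in range(len(s) // 3)]
-- ===== Notes on version B (the rewrite author's own statement) =====
-- stated objective: simpler
-- what changed: B replaces A's single interleaved pass (a stateful leftover carry between lines plus an inner while-loop) by two separate passes: join all rstripped lines into one string, then slice it into 3-char codons by index, dropping the remainder.
import Mathlib
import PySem

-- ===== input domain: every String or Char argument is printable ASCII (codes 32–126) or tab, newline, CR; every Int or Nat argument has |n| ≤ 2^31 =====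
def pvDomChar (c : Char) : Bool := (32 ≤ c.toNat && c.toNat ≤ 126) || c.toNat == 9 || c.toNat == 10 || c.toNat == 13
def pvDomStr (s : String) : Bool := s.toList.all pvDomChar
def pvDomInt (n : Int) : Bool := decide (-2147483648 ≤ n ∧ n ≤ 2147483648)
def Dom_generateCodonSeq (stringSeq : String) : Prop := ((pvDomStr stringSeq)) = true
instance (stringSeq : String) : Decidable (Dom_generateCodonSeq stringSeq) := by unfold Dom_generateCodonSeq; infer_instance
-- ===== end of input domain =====

-- B replaces A's interleaved pass (stateful `extras` carry + inner while) by two passes: join all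
-- rstripped lines, then slice the joined string into 3-char codons (objective: simpler).

-- ===== PORT A =====
-- the inner `while j<=len(string): append(string[i:j]); i+=3; j+=3` plus `extras = string[i:]`,
-- as structural recursion returning (emitted codons, leftover extras)
def pvChunkA (s : List Char) : List String × List Char :=
  if h : 3 ≤ s.length then
    let p := pvChunkA (s.drop 3)
    (String.mk (s.take 3) :: p.1, p.2)
  else ([], s)
termination_by s.length
decreasing_by simp; omega

-- one iteration of `for line in stringSeq` (iterating a Python str yields its characters)
def pvStepA (st : List String × List Char) (c : Char) : List String × List Char :=
  let line := PySem.Str.rstrip (String.mk [c])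
  let s := st.2 ++ line.toList
  let p := pvChunkA s
  (st.1 ++ p.1, p.2)

def generateCodonSeq (stringSeq : String) : List String :=
  (stringSeq.toList.foldl pvStepA ([], [])).1

-- ===== PORT B =====
def generateCodonSeq_alt (stringSeq : String) : List String :=
  let s : List Char := stringSeq.toList.flatMap (fun c => (PySem.Str.rstrip (String.mk [c])).toList)
  -- s[3*k : 3*k+3] with nonnegative in-range bounds = (s.drop (3*k)).take 3 (PySem.List.slice_natCast_add)
  (List.range (s.length / 3)).map (fun k => String.mk ((s.drop (3 * k)).take 3))

-- ===== PRECONDITION & SPEC =====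
def Spec_generateCodonSeq (stringSeq : String) (out : List String) : Prop := out = generateCodonSeq_alt stringSeq
instance (stringSeq : String) (out : List String) : Decidable (Spec_generateCodonSeq stringSeq out) := by unfold Spec_generateCodonSeq; infer_instance

-- ===== CLAIM (what is proved, stated in full; the proofs are below) =====
def Claim_equal_generateCodonSeq : Prop := ∀ (stringSeq : String), Dom_generateCodonSeq stringSeq → Spec_generateCodonSeq stringSeq (generateCodonSeq stringSeq)

-- ===== LEMMAS AND PROOFS =====

-- full 3-chunks of (t ++ u) = full 3-chunks of t, then those of (leftover of t ++ u)
theorem pvChunkA_split (n : Nat) : ∀ (t u : List Char), t.length ≤ n →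
    pvChunkA (t ++ u) = ((pvChunkA t).1 ++ (pvChunkA ((pvChunkA t).2 ++ u)).1,
                         (pvChunkA ((pvChunkA t).2 ++ u)).2) := by
  induction n with
  | zero =>
    intro t u ht
    have : t = [] := List.length_eq_zero_iff.mp (Nat.le_zero.mp ht)
    subst this
    have h0 : pvChunkA ([] : List Char) = ([], []) := by rw [pvChunkA.eq_def]; simp
    simp [h0]
  | succ n ih =>
    intro t u ht
    by_cases h3 : 3 ≤ t.length
    · rw [pvChunkA.eq_def (s := t ++ u), pvChunkA.eq_def (s := t)]
      have hlen : 3 ≤ (t ++ u).length := by simp; omega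
      rw [dif_pos hlen, dif_pos h3]
      have hdrop : (t ++ u).drop 3 = t.drop 3 ++ u := List.drop_append_of_le_length h3
      have htake : (t ++ u).take 3 = t.take 3 := List.take_append_of_le_length h3
      rw [hdrop, htake, ih (t.drop 3) u (by simp; omega)]
      simp
    · rw [pvChunkA.eq_def (s := t)]
      rw [dif_neg h3]
      simp

-- the leftover `extras` always has fewer than 3 characters
theorem pvChunkA_rem (n : Nat) : ∀ (s : List Char), s.length ≤ n → (pvChunkA s).2.length < 3 := by
  induction n with
  | zero =>
    intro s hs
    have : s = [] := List.length_eq_zero_iff.mp (Nat.le_zero.mp hs)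
    subst this
    rw [pvChunkA.eq_def]
    simp
  | succ n ih =>
    intro s hs
    by_cases h3 : 3 ≤ s.length
    · rw [pvChunkA.eq_def, dif_pos h3]
      exact ih (s.drop 3) (by simp; omega)
    · rw [pvChunkA.eq_def, dif_neg h3]
      simpa using by omega

-- A's fold over the remaining characters, from any state, yields chunks of `extras ++ rest`
theorem pvFoldA (l : List Char) : ∀ (acc : List String) (ex : List Char), ex.length < 3 →
    l.foldl pvStepA (acc, ex)
      = (acc ++ (pvChunkA (ex ++ l.flatMap (fun c => (PySem.Str.rstrip (String.mk [c])).toList))).1,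
         (pvChunkA (ex ++ l.flatMap (fun c => (PySem.Str.rstrip (String.mk [c])).toList))).2) := by
  induction l with
  | nil =>
    intro acc ex hex
    have h0 : pvChunkA ex = ([], ex) := by rw [pvChunkA.eq_def, dif_neg (by omega)]
    simp [h0]
  | cons c l ih =>
    intro acc ex hex
    simp only [List.foldl_cons, List.flatMap_cons]
    rw [show pvStepA (acc, ex) c
        = (acc ++ (pvChunkA (ex ++ (PySem.Str.rstrip (String.mk [c])).toList)).1,
           (pvChunkA (ex ++ (PySem.Str.rstrip (String.mk [c])).toList)).2) from rfl]
    rw [ih _ _ (pvChunkA_rem _ _ le_rfl)]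
    rw [← List.append_assoc,
        pvChunkA_split (ex ++ (PySem.Str.rstrip (String.mk [c])).toList).length
          (ex ++ (PySem.Str.rstrip (String.mk [c])).toList) _ le_rfl]
    simp

-- B's indexed slicing produces exactly the first component of A's chunk recursion
theorem pvChunkB_eq (n : Nat) : ∀ (s : List Char), s.length ≤ n →
    (List.range (s.length / 3)).map (fun k => String.mk ((s.drop (3 * k)).take 3))
      = (pvChunkA s).1 := by
  induction n with
  | zero =>
    intro s hs
    have : s = [] := List.length_eq_zero_iff.mp (Nat.le_zero.mp hs)
    subst this
    have h0 : pvChunkA ([] : List Char) = ([], []) := by rw [pvChunkA.eq_def]; simp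
    simp [h0]
  | succ n ih =>
    intro s hs
    by_cases h3 : 3 ≤ s.length
    · rw [pvChunkA.eq_def, dif_pos h3]
      have hdiv : s.length / 3 = (s.drop 3).length / 3 + 1 := by
        simp only [List.length_drop]
        omega
      rw [hdiv, List.range_succ_eq_map, List.map_cons, List.map_map]
      simp only [Nat.mul_zero, List.drop_zero]
      congr 1
      rw [← ih (s.drop 3) (by simp; omega)]
      apply List.map_congr_left
      intro k _
      simp only [Function.comp]
      congr 2
      rw [List.drop_drop]
      congr 1
      omega
    · rw [pvChunkA.eq_def, dif_neg h3]
      have : s.length / 3 = 0 := Nat.div_eq_of_lt (by omega)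
      simp [this]

-- ===== VERDICT (by name: the statement is the Claim_ definition above) =====
theorem generateCodonSeq_spec : Claim_equal_generateCodonSeq := by
  intro stringSeq _
  unfold Spec_generateCodonSeq generateCodonSeq generateCodonSeq_alt
  rw [pvFoldA stringSeq.toList [] [] (by simp)]
  rw [pvChunkB_eq (stringSeq.toList.flatMap
      (fun c => (PySem.Str.rstrip (String.mk [c])).toList)).length _ le_rfl]
  simp
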